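-- pv_equiv track=rewrite | github.com/mehrdadhalali/Advent-Of-Code | 2021/day_3.py | get_extreme_readings
-- ===== SOURCE A (Python) =====
-- from math import ceil
--
-- def sum_position_at(readings: list[list], position: int) -> int:
--     """Sums up all of the readings at index `position`"""
--
--     return sum([reading[position] for reading in readings])
--
-- def get_extreme_readings(readings: list[list], position: int, minority: bool) -> list[list]:
--     """Returns the list of readings with a majority/minority on a given position."""
--
--     number_of_readings = len(readings)
--
--     half = ceil(number_of_readings / 2)
--
--     total = sum_position_at(readings, position)
--
--     if not minority:
--         is_extreme = int(total >= half)
--     else: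
--         is_extreme = int(total < half)
--
--     return [reading for reading in readings if reading[position] == is_extreme]
-- ===== SOURCE B (Python) =====
-- def get_extreme_readings(readings: list[list], position: int, minority: bool) -> list[list]:
--     """Group readings by their value at `position` into buckets, derive the
--     column total from bucket statistics, and answer by one dict lookup."""
--     groups = {}
--     for reading in readings:
--         groups.setdefault(reading[position], []).append(reading)
--     total = sum(value * len(bucket) for value, bucket in groups.items())
--     target = int((2 * total >= len(readings)) != minority)
--     return groups.get(target, [])
-- ===== Notes on version B (the rewrite author's own statement) =====
-- stated objective: alternative
-- what changed: Replaces A's column-sum helper, ceil/branch flag and filter comprehension with a dict that groups readings into buckets keyed by column value; the total is derived from bucket statistics (value * bucket size), the target bit is one branch-free xor test 2*total >= n, and the result is a single dict lookup instead of a filter pass.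
import Mathlib
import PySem

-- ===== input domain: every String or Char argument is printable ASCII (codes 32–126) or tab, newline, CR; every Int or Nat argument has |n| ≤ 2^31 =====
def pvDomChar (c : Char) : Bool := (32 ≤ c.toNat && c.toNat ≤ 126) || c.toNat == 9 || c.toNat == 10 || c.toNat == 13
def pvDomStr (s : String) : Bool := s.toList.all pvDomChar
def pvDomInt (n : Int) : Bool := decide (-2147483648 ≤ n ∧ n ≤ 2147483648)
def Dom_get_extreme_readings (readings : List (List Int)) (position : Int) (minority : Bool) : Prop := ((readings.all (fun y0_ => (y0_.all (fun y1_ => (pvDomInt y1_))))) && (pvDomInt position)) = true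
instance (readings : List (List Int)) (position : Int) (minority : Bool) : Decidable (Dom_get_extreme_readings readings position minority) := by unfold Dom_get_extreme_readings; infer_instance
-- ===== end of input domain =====

-- B groups readings into a dict of buckets keyed by column value, derives the
-- column total from bucket statistics and answers by one dict lookup
-- (alternative algorithm; return value only, no mutation involved).

-- ===== PORT A =====
-- helper `sum_position_at`: sum([reading[position] for reading in readings]).
-- Under Pre_ every pyGet? is some, so the getD 0 default is never used.
def sum_position_at (readings : List (List Int)) (position : Int) : Int :=
  (readings.map (fun reading => (PySem.List.pyGet? reading position).getD 0)).sum

def get_extreme_readings (readings : List (List Int)) (position : Int) (minority : Bool) : List (List Int) :=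
  let number_of_readings : Int := readings.length
  -- ceil(n/2): exact for list lengths (no float rounding at these magnitudes)
  let half : Int := (number_of_readings + 1) / 2
  let total : Int := sum_position_at readings position
  let is_extreme : Int :=
    if !minority then (if total ≥ half then 1 else 0)
    else (if total < half then 1 else 0)
  readings.filter (fun reading => (PySem.List.pyGet? reading position).getD 0 == is_extreme)

-- ===== PORT B =====
def get_extreme_readings_alt (readings : List (List Int)) (position : Int) (minority : Bool) : List (List Int) :=
  -- groups.setdefault(reading[position], []).append(reading) = modify with default []
  let groups : PySem.Dict Int (List (List Int)) :=
    readings.foldl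
      (fun d reading =>
        d.modify ((PySem.List.pyGet? reading position).getD 0) [] (fun g => g ++ [reading]))
      PySem.Dict.empty
  let total : Int := (groups.items.map (fun p => p.1 * (p.2.length : Int))).sum
  let target : Int := if (decide (2 * total ≥ (readings.length : Int)) != minority) then 1 else 0
  groups.getD target []

-- ===== PRECONDITION & SPEC =====
-- Pre_: `reading[position]` must not raise IndexError, i.e. position is a valid
-- (possibly negative) Python index into every reading.
def Pre_get_extreme_readings (readings : List (List Int)) (position : Int) (minority : Bool) : Prop :=
  ∀ r ∈ readings, -(r.length : Int) ≤ position ∧ position < r.length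
instance (readings : List (List Int)) (position : Int) (minority : Bool) : Decidable (Pre_get_extreme_readings readings position minority) := by unfold Pre_get_extreme_readings; infer_instance

def pvWitness_get_extreme_readings : List (List Int) × Int × Bool := ([[1, 0], [0, 1], [1, 1]], 0, false)

def Spec_get_extreme_readings (readings : List (List Int)) (position : Int) (minority : Bool) (out : List (List Int)) : Prop := out = get_extreme_readings_alt readings position minority
instance (readings : List (List Int)) (position : Int) (minority : Bool) (out : List (List Int)) : Decidable (Spec_get_extreme_readings readings position minority out) := by unfold Spec_get_extreme_readings; infer_instance

-- ===== CLAIM =====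
def Claim_equal_get_extreme_readings : Prop := ∀ (readings : List (List Int)) (position : Int) (minority : Bool), Dom_get_extreme_readings readings position minority → Pre_get_extreme_readings readings position minority → Spec_get_extreme_readings readings position minority (get_extreme_readings readings position minority)

-- ===== LEMMAS AND PROOFS =====

-- abbreviation used only in the proofs
def colv (position : Int) (r : List Int) : Int := (PySem.List.pyGet? r position).getD 0

def itemsSum (d : PySem.Dict Int (List (List Int))) : Int :=
  (d.items.map (fun p => p.1 * (p.2.length : Int))).sum

theorem sum_replace (l : List (Int × List (List Int))) (k : Int) (w : List (List Int)) (r : List Int)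
    (hnd : (l.map (·.1)).Nodup) (hmem : (k, w) ∈ l) :
    ((l.map (fun p => if p.1 == k then (k, w ++ [r]) else p)).map (fun p => p.1 * (p.2.length : Int))).sum
      = (l.map (fun p => p.1 * (p.2.length : Int))).sum + k := by
  induction l with
  | nil => simp at hmem
  | cons a l ih =>
    simp only [List.map_cons, List.nodup_cons, List.mem_map] at hnd
    rcases List.mem_cons.mp hmem with h | h
    · subst h
      have htail : ∀ p ∈ l, (p.1 == k) = false := by
        intro p hp
        by_contra hc
        exact hnd.1 ⟨p, hp, by simpa using (Bool.of_not_eq_false hc)⟩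
      have hid : l.map (fun p => if p.1 == k then (k, w ++ [r]) else p) = l := by
        calc l.map (fun p => if p.1 == k then (k, w ++ [r]) else p)
            = l.map (fun p => p) := List.map_congr_left (fun p hp => by simp [htail p hp])
          _ = l := List.map_id' l
      simp only [List.map_cons, hid, BEq.rfl, if_true, List.sum_cons, List.length_append,
        List.length_singleton]
      push_cast
      ring
    · have hak : (a.1 == k) = false := by
        by_contra hc
        have hk : a.1 = k := by simpa using (Bool.of_not_eq_false hc)
        exact hnd.1 ⟨(k, w), h, by simp [hk]⟩
      simp only [List.map_cons, hak, Bool.false_eq_true, if_false, List.sum_cons]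
      rw [ih hnd.2 h]; ring

theorem itemsSum_step (d : PySem.Dict Int (List (List Int))) (k : Int) (r : List Int)
    (hnd : d.keys.Nodup) :
    itemsSum (d.insert k (d.getD k [] ++ [r])) = itemsSum d + k := by
  by_cases hc : d.contains k = true
  · have hsome : (d.get? k).isSome := by
      rw [← PySem.Dict.contains_eq_isSome_get?]; exact hc
    obtain ⟨w, hw⟩ := Option.isSome_iff_exists.mp hsome
    have hmem : (k, w) ∈ d.items := PySem.Dict.mem_items_of_get?_eq_some d hw
    have hgd : d.getD k [] = w := by
      rw [PySem.Dict.getD_eq_get?_getD, hw]; rfl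
    unfold itemsSum
    rw [PySem.Dict.items_insert_of_contains _ _ hc, hgd]
    have hnd' : (d.items.map (·.1)).Nodup := hnd
    exact sum_replace d.items k w r hnd' hmem
  · have hc' : d.contains k = false := by simpa using hc
    unfold itemsSum
    rw [PySem.Dict.items_insert_of_not_contains _ _ hc',
        PySem.Dict.getD_of_not_contains _ _ hc']
    simp

-- `modify k [] (· ++ [r])` is insert of the appended bucket
theorem modify_eq_insert (d : PySem.Dict Int (List (List Int))) (k : Int) (r : List Int) :
    d.modify k [] (fun g => g ++ [r]) = d.insert k (d.getD k [] ++ [r]) := rfl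

theorem itemsSum_fold (position : Int) (rs : List (List Int))
    (d : PySem.Dict Int (List (List Int))) (hnd : d.keys.Nodup) :
    itemsSum (rs.foldl (fun d r => d.modify (colv position r) [] (fun g => g ++ [r])) d)
      = itemsSum d + (rs.map (colv position)).sum := by
  induction rs generalizing d with
  | nil => simp
  | cons r rs ih =>
    simp only [List.foldl_cons, List.map_cons, List.sum_cons]
    rw [modify_eq_insert]
    have hnd' : ((d.insert (colv position r) (d.getD (colv position r) [] ++ [r])).keys).Nodup :=
      PySem.Dict.nodup_keys_insert _ _ _ hnd
    rw [ih _ hnd', itemsSum_step d _ r hnd]; ring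

theorem groups_getD (position : Int) (rs : List (List Int)) (c : Int) :
    (rs.foldl (fun d r => d.modify (colv position r) [] (fun g => g ++ [r]))
        (PySem.Dict.empty : PySem.Dict Int (List (List Int)))).getD c []
      = rs.filter (fun r => colv position r == c) := by
  have h : rs.foldl (fun d r => d.modify (colv position r) [] (fun g => g ++ [r]))
        (PySem.Dict.empty : PySem.Dict Int (List (List Int)))
      = (rs.map (fun r => (colv position r, r))).foldl
          (fun d p => d.modify p.1 [] (fun g => g ++ [p.2])) PySem.Dict.empty := by
    rw [List.foldl_map]
  rw [h, PySem.Dict.getD_foldl_modify_append]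
  simp [List.filter_map, Function.comp_def]

theorem flag_eq (t n : Int) (m : Bool) :
    (if (!m) = true then (if t ≥ (n + 1) / 2 then (1 : Int) else 0)
       else (if t < (n + 1) / 2 then (1 : Int) else 0))
      = (if (decide (2 * t ≥ n) != m) = true then (1 : Int) else 0) := by
  cases m <;>
    simp only [Bool.not_false, Bool.not_true, if_true, Bool.false_eq_true, if_false,
      bne_iff_ne, ne_eq, decide_eq_true_eq, decide_eq_false_iff_not] <;>
    split_ifs <;> simp_all <;> omega

theorem get_extreme_readings_eq (readings : List (List Int)) (position : Int) (minority : Bool) :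
    get_extreme_readings readings position minority = get_extreme_readings_alt readings position minority := by
  unfold get_extreme_readings get_extreme_readings_alt sum_position_at
  simp only
  have htot :
      ((readings.foldl (fun d reading =>
          d.modify ((PySem.List.pyGet? reading position).getD 0) [] (fun g => g ++ [reading]))
          (PySem.Dict.empty : PySem.Dict Int (List (List Int)))).items.map
            (fun p => p.1 * (p.2.length : Int))).sum
        = (readings.map (fun reading => (PySem.List.pyGet? reading position).getD 0)).sum := by
    have := itemsSum_fold position readings PySem.Dict.empty PySem.Dict.nodup_keys_empty
    simpa [itemsSum, colv, PySem.Dict.empty, PySem.Dict.items] using this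
  rw [htot]
  have hflag :
      (if (!minority) = true
        then (if (readings.map (fun reading => (PySem.List.pyGet? reading position).getD 0)).sum ≥ ((readings.length : Int) + 1) / 2 then (1 : Int) else 0)
        else (if (readings.map (fun reading => (PySem.List.pyGet? reading position).getD 0)).sum < ((readings.length : Int) + 1) / 2 then (1 : Int) else 0))
      = (if (decide (2 * (readings.map (fun reading => (PySem.List.pyGet? reading position).getD 0)).sum ≥ (readings.length : Int)) != minority) then (1 : Int) else 0) := by
    exact flag_eq _ _ minority
  rw [hflag]
  simpa [colv] using (groups_getD position readings _).symm

-- ===== VERDICT =====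
theorem get_extreme_readings_spec : Claim_equal_get_extreme_readings := by
  intro readings position minority _ _
  exact get_extreme_readings_eq readings position minority
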